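-- pv_equiv track=rewrite | github.com/Turba2/system_analysis_tukhbatulinaa_bpm_22_po_2 | task1/task.py | compute_matrices
-- ===== SOURCE A (Python) =====
-- def compute_matrices(edges, idx, nodes, root):
--     n = len(nodes)
--     r1 = [[False]*n for _ in range(n)]
--     r2 = [[False]*n for _ in range(n)]
--     r3 = [[False]*n for _ in range(n)]
--     r4 = [[False]*n for _ in range(n)]
--     r5 = [[False]*n for _ in range(n)]
--
--     children = {}
--     for v in nodes:
--         children[v] = []
--     for u, v in edges:
--         children[u].append(v)
--
--     for u, v in edges:
--         i = idx[u]
--         j = idx[v]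
--         r1[i][j] = True
--         r2[j][i] = True
--
--     def dfs(start, cur, visited):
--         for ch in children[cur]:
--             if ch not in visited:
--                 visited.add(ch)
--                 dfs(start, ch, visited)
--
--     for u in nodes:
--         visited = set()
--         dfs(u, u, visited)
--         if u in visited:
--             visited.remove(u)
--         for v in visited:
--             i = idx[u]
--             j = idx[v]
--             if not r1[i][j]:
--                 r3[i][j] = True
--             if not r2[j][i]:
--                 r4[j][i] = True
--
--     for u, vs in children.items():
--         if len(vs) > 1:
--             for i1 in range(len(vs)):
--                 for i2 in range(i1 + 1, len(vs)):
--                     x = vs[i1]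
--                     y = vs[i2]
--                     ix = idx[x]
--                     iy = idx[y]
--                     r5[ix][iy] = True
--                     r5[iy][ix] = True
--
--     return r1, r2, r3, r4, r5
-- ===== SOURCE B (Python) =====
-- def compute_matrices(edges, idx, nodes, root):
--     n = len(nodes)
--
--     def blank():
--         return [[False] * n for _ in range(n)]
--
--     def mark(m, cells):
--         for i, j in cells:
--             m[i][j] = True
--         return m
--
--     kids = {u: [] for u in nodes}
--     for u, v in edges:
--         kids[u].append(v)
--
--     def descendants(u):
--         # naive closure: grow the set until it stops changing
--         cur = set()
--         while True:
--             nxt = cur | set(kids[u])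
--             for x in cur:
--                 nxt |= set(kids[x])
--             if nxt == cur:
--                 return cur
--             cur = nxt
--
--     direct = [(idx[u], idx[v]) for u, v in edges]
--     r1 = mark(blank(), direct)
--     r2 = mark(blank(), [(j, i) for i, j in direct])
--
--     r3 = blank()
--     r4 = blank()
--     for u in nodes:
--         for v in descendants(u):
--             if v != u:
--                 i, j = idx[u], idx[v]
--                 if not r1[i][j]:
--                     r3[i][j] = True
--                 if not r2[j][i]:
--                     r4[j][i] = True
--
--     r5 = blank()
--     for vs in kids.values():
--         if len(vs) > 1:
--             for i1 in range(len(vs)):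
--                 for i2 in range(i1 + 1, len(vs)):
--                     x, y = vs[i1], vs[i2]
--                     r5[idx[x]][idx[y]] = True
--                     r5[idx[y]][idx[x]] = True
--
--     return r1, r2, r3, r4, r5
-- ===== Notes on version B (the rewrite author's own statement) =====
-- stated objective: alternative
-- what changed: The per-node recursive DFS is replaced by an iterative grow-until-fixpoint closure of each node's descendant set (a while loop that stops when the set stops changing), and the direct-edge matrices are filled from a precomputed coordinate-pair list by a generic mark helper instead of per-edge in-place double writes.
import Mathlib
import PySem

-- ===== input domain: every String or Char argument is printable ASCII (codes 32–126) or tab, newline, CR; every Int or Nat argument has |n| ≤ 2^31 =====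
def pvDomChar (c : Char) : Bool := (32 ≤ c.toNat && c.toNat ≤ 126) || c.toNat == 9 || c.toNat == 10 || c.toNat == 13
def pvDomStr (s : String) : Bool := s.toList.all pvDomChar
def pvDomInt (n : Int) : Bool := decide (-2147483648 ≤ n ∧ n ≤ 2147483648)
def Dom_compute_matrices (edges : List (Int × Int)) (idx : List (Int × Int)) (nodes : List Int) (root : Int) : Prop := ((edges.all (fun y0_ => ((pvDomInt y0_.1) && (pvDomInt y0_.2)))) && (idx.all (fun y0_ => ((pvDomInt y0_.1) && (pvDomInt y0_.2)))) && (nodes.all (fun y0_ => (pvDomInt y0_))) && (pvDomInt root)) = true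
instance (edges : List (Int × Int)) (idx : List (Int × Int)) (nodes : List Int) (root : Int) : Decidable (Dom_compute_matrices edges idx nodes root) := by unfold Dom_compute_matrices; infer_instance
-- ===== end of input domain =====

-- B replaces the per-node recursive DFS by an iterative grow-until-fixpoint closure of
-- each node's descendant set and fills the direct-edge matrices from a precomputed
-- coordinate-pair list via a generic mark helper (objective: alternative).

-- ===== PORT A =====
-- children = {v: [] for v in nodes}; for u, v in edges: children[u].append(v)
-- (identical lines appear in both Pythons, so the helper is shared by both ports)
def childrenOf (edges : List (Int × Int)) (nodes : List Int) : PySem.Dict Int (List Int) :=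
  let d0 := nodes.foldl (fun d v => d.insert v ([] : List Int)) PySem.Dict.empty
  edges.foldl (fun d e => d.modify e.1 [] (fun l => l ++ [e.2])) d0

-- m[i][j] = True  (Python list assignment; negative indices in [-len,len) wrap,
-- exactly the inputs Pre_ admits — out-of-range indices raise in Python, excluded;
-- this helper too is the same assignment line in both Pythons, so it is shared)
def mset (m : List (List Bool)) (i j : Int) : List (List Bool) :=
  let i' := (PySem.Int.mod i (m.length : Int)).toNat
  m.set i' ((m.getD i' []).set ((PySem.Int.mod j (m.length : Int)).toNat) true)

-- m[i][j]  (read, same wrapping)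
def mget (m : List (List Bool)) (i j : Int) : Bool :=
  (m.getD ((PySem.Int.mod i (m.length : Int)).toNat) []).getD
    ((PySem.Int.mod j (m.length : Int)).toNat) false

-- def dfs(start, cur, visited): for ch in children[cur]: if ch not in visited: visited.add(ch); dfs(start, ch, visited)
-- fuel = len(edges)+1 can never run out: each nested call first adds a fresh edge target to visited
def dfsA (children : PySem.Dict Int (List Int)) : Nat → Int → PySem.Set Int → PySem.Set Int
  | 0, _, visited => visited
  | fuel+1, cur, visited =>
    (children.getD cur []).foldl
      (fun vis ch => if ch ∈ vis then vis else dfsA children fuel ch (PySem.Set.add vis ch))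
      visited

def compute_matrices (edges : List (Int × Int)) (idx : List (Int × Int)) (nodes : List Int) (root : Int) : List (List Bool) × List (List Bool) × List (List Bool) × List (List Bool) × List (List Bool) :=
  let n := nodes.length
  let z : List (List Bool) := List.replicate n (List.replicate n false)
  let d := PySem.Dict.mk idx
  let children := childrenOf edges nodes
  let p12 := edges.foldl (fun (p : List (List Bool) × List (List Bool)) e =>
      (mset p.1 (d.getD e.1 0) (d.getD e.2 0), mset p.2 (d.getD e.2 0) (d.getD e.1 0))) (z, z)
  let r1 := p12.1
  let r2 := p12.2
  let p34 := nodes.foldl (fun (p : List (List Bool) × List (List Bool)) u =>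
      let visited := PySem.Set.discard (dfsA children (edges.length + 1) u PySem.Set.empty) u
      visited.foldl (fun (p : List (List Bool) × List (List Bool)) v =>
        ((if mget r1 (d.getD u 0) (d.getD v 0) then p.1 else mset p.1 (d.getD u 0) (d.getD v 0)),
         (if mget r2 (d.getD v 0) (d.getD u 0) then p.2 else mset p.2 (d.getD v 0) (d.getD u 0)))) p)
    (z, z)
  let r5 := children.items.foldl (fun r uvs =>
      let vs := uvs.2
      if vs.length > 1 then
        (PySem.List.pyRange 0 (vs.length : Int) 1).foldl (fun r i1 =>
          (PySem.List.pyRange (i1+1) (vs.length : Int) 1).foldl (fun r i2 =>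
            let x := PySem.List.pyGetD vs i1 0
            let y := PySem.List.pyGetD vs i2 0
            mset (mset r (d.getD x 0) (d.getD y 0)) (d.getD y 0) (d.getD x 0)) r) r
      else r) z
  (r1, r2, p34.1, p34.2, r5)

-- ===== PORT B =====
-- def blank(): return [[False]*n for _ in range(n)]
def blankM (n : Nat) : List (List Bool) := List.replicate n (List.replicate n false)

-- def mark(m, cells): for i, j in cells: m[i][j] = True; return m
def markM (m : List (List Bool)) (cells : List (Int × Int)) : List (List Bool) :=
  cells.foldl (fun m c => mset m c.1 c.2) m

-- one body of the while loop: nxt = cur | set(kids[u]); for x in cur: nxt |= set(kids[x])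
def altStep (kids : PySem.Dict Int (List Int)) (u : Int) (cur : PySem.Set Int) : PySem.Set Int :=
  let nxt := PySem.Set.union cur (PySem.Set.ofList (kids.getD u []))
  cur.foldl (fun s x => PySem.Set.union s (PySem.Set.ofList (kids.getD x []))) nxt

-- while True: nxt = <altStep>; if nxt == cur: return cur; cur = nxt
-- (fuel is a totality device only: the set grows inside the edge targets, so the
-- Python loop exits within len(edges)+1 rounds; 'nxt == cur' is Python set equality)
def altLoop (kids : PySem.Dict Int (List Int)) (u : Int) : Nat → PySem.Set Int → PySem.Set Int
  | 0, cur => cur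
  | f+1, cur =>
    let nxt := altStep kids u cur
    if PySem.Set.equal nxt cur then cur else altLoop kids u f nxt

-- def descendants(u): cur = set(); while True: ...  (see altLoop)
def altDescend (kids : PySem.Dict Int (List Int)) (e : Nat) (u : Int) : PySem.Set Int :=
  altLoop kids u (e + 1) PySem.Set.empty

def compute_matrices_alt (edges : List (Int × Int)) (idx : List (Int × Int)) (nodes : List Int) (root : Int) : List (List Bool) × List (List Bool) × List (List Bool) × List (List Bool) × List (List Bool) :=
  let n := nodes.length
  let d := PySem.Dict.mk idx
  let kids := childrenOf edges nodes
  let direct := edges.map (fun e => (d.getD e.1 0, d.getD e.2 0))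
  let r1 := markM (blankM n) direct
  let r2 := markM (blankM n) (direct.map (fun p => (p.2, p.1)))
  let p34 := nodes.foldl (fun (p : List (List Bool) × List (List Bool)) u =>
      (altDescend kids edges.length u).foldl (fun (p : List (List Bool) × List (List Bool)) v =>
        if v ≠ u then
          ((if mget r1 (d.getD u 0) (d.getD v 0) then p.1 else mset p.1 (d.getD u 0) (d.getD v 0)),
           (if mget r2 (d.getD v 0) (d.getD u 0) then p.2 else mset p.2 (d.getD v 0) (d.getD u 0)))
        else p) p) (blankM n, blankM n)
  let r5 := kids.values.foldl (fun r vs =>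
      if vs.length > 1 then
        (PySem.List.pyRange 0 (vs.length : Int) 1).foldl (fun r i1 =>
          (PySem.List.pyRange (i1+1) (vs.length : Int) 1).foldl (fun r i2 =>
            let x := PySem.List.pyGetD vs i1 0
            let y := PySem.List.pyGetD vs i2 0
            mset (mset r (d.getD x 0) (d.getD y 0)) (d.getD y 0) (d.getD x 0)) r) r
      else r) (blankM n)
  (r1, r2, p34.1, p34.2, r5)

-- ===== PRECONDITION & SPEC =====
-- x has an idx entry whose value is a valid (possibly negative) Python index into a list of length n
def idxOK (idx : List (Int × Int)) (n : Nat) (x : Int) : Bool :=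
  ((PySem.Dict.mk idx).get? x).isSome
    && decide (-(n : Int) ≤ (PySem.Dict.mk idx).getD x 0)
    && decide ((PySem.Dict.mk idx).getD x 0 < (n : Int))

-- Exactly the inputs on which the Python A returns: both endpoints of every edge are
-- in nodes (else KeyError in children/dfs) and have an idx entry in range (else
-- KeyError / IndexError on the matrix writes). A raises on every other input.
def Pre_compute_matrices (edges : List (Int × Int)) (idx : List (Int × Int)) (nodes : List Int) (root : Int) : Prop :=
  ∀ e ∈ edges, e.1 ∈ nodes ∧ e.2 ∈ nodes ∧
    idxOK idx nodes.length e.1 = true ∧ idxOK idx nodes.length e.2 = true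

instance (edges : List (Int × Int)) (idx : List (Int × Int)) (nodes : List Int) (root : Int) : Decidable (Pre_compute_matrices edges idx nodes root) := by
  unfold Pre_compute_matrices; infer_instance

def pvWitness_compute_matrices : (List (Int × Int)) × (List (Int × Int)) × List Int × Int :=
  ([(1, 2), (1, 3), (3, 1)], [(1, 0), (2, 1), (3, 2)], [1, 2, 3], 1)

def Spec_compute_matrices (edges : List (Int × Int)) (idx : List (Int × Int)) (nodes : List Int) (root : Int) (out : List (List Bool) × List (List Bool) × List (List Bool) × List (List Bool) × List (List Bool)) : Prop := out = compute_matrices_alt edges idx nodes root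
instance (edges : List (Int × Int)) (idx : List (Int × Int)) (nodes : List Int) (root : Int) (out : List (List Bool) × List (List Bool) × List (List Bool) × List (List Bool) × List (List Bool)) : Decidable (Spec_compute_matrices edges idx nodes root out) := by unfold Spec_compute_matrices; infer_instance

-- ===== CLAIM (what is proved, stated in full; the proofs are below) =====
def Claim_equal_compute_matrices : Prop := ∀ (edges : List (Int × Int)) (idx : List (Int × Int)) (nodes : List Int) (root : Int), Dom_compute_matrices edges idx nodes root → Pre_compute_matrices edges idx nodes root → Spec_compute_matrices edges idx nodes root (compute_matrices edges idx nodes root)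

-- ===== LEMMAS AND PROOFS =====

theorem foldl_pair_split {α β γ : Type} (l : List α) (f : β → α → β) (g : γ → α → γ) (p : β × γ) :
    l.foldl (fun p x => (f p.1 x, g p.2 x)) p = (l.foldl f p.1, l.foldl g p.2) := by
  induction l generalizing p with
  | nil => rfl
  | cons x t ih => rw [List.foldl_cons]; exact ih (f p.1 x, g p.2 x)

theorem foldl_pair_split_nested {α β : Type} {σ τ : Type} (l : List α) (vs : α → List β)
    (f : σ → α → β → σ) (g : τ → α → β → τ) (p : σ × τ) :
    l.foldl (fun p x => (vs x).foldl (fun p y => (f p.1 x y, g p.2 x y)) p) p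
      = (l.foldl (fun m x => (vs x).foldl (fun m y => f m x y) m) p.1,
         l.foldl (fun m x => (vs x).foldl (fun m y => g m x y) m) p.2) := by
  induction l generalizing p with
  | nil => rfl
  | cons x t ih =>
    rw [List.foldl_cons, List.foldl_cons, List.foldl_cons]
    rw [foldl_pair_split (vs x) (fun m y => f m x y) (fun m y => g m x y) p]
    exact ih _

-- ------- children characterization -------
theorem getD_init_nil (nodes : List Int) (x : Int) :
    (nodes.foldl (fun d v => d.insert v ([] : List Int)) PySem.Dict.empty).getD x [] = [] := by
  suffices h : ∀ d : PySem.Dict Int (List Int), (∀ y, d.getD y [] = []) →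
      (nodes.foldl (fun d v => d.insert v ([] : List Int)) d).getD x [] = [] by
    exact h _ (fun y => PySem.Dict.getD_empty _ _)
  induction nodes with
  | nil => intro d h; exact h x
  | cons a t ih =>
    intro d h
    refine ih _ (fun y => ?_)
    rw [PySem.Dict.getD_insert]
    split <;> simp [h]

theorem childrenOf_getD (edges : List (Int × Int)) (nodes : List Int) (x : Int) :
    (childrenOf edges nodes).getD x [] = (edges.filter (fun e => e.1 == x)).map (·.2) := by
  unfold childrenOf
  rw [PySem.Dict.getD_foldl_modify_append, getD_init_nil]
  simp

-- ------- matrix entries -------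
def entM (m : List (List Bool)) (a b : Nat) : Bool := ((m[a]?.getD [])[b]?).getD false

def SqM (n : Nat) (m : List (List Bool)) : Prop := m.length = n ∧ ∀ r ∈ m, r.length = n

def toIx (n : Nat) (i : Int) : Nat := (PySem.Int.mod i (n : Int)).toNat

theorem toIx_lt {n : Nat} (hn : 0 < n) (i : Int) : toIx n i < n := by
  have h1 := PySem.Int.mod_nonneg i (b := (n : Int)) (by exact_mod_cast hn)
  have h2 := PySem.Int.mod_lt i (b := (n : Int)) (by exact_mod_cast hn)
  unfold toIx; omega

theorem SqM_zero (n : Nat) : SqM n (List.replicate n (List.replicate n false)) := by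
  constructor
  · simp
  · intro r hr; simp_all [List.eq_of_mem_replicate hr]

theorem SqM_mset {n : Nat} {m : List (List Bool)} (h : SqM n m) (i j : Int) :
    SqM n (mset m i j) := by
  obtain ⟨h1, h2⟩ := h
  refine ⟨by simp [mset, h1], ?_⟩
  intro r hr
  rcases List.mem_or_eq_of_mem_set hr with hm | rfl
  · exact h2 r hm
  · rw [List.length_set]
    rcases Nat.eq_zero_or_pos n with rfl | hn
    · have : m = [] := List.length_eq_zero_iff.mp h1
      subst this
      simp [mset] at hr
    · have hlt : (PySem.Int.mod i (m.length : Int)).toNat < m.length := by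
        have := PySem.Int.mod_nonneg i (b := (m.length : Int)) (by omega)
        have := PySem.Int.mod_lt i (b := (m.length : Int)) (by omega)
        omega
      have : m.getD (PySem.Int.mod i (m.length : Int)).toNat [] = m[(PySem.Int.mod i (m.length : Int)).toNat] := by
        simp [List.getD, List.getElem?_eq_getElem hlt]
      rw [this]
      exact h2 _ (List.getElem_mem hlt)

theorem entM_mset {n : Nat} {m : List (List Bool)} (hn : 0 < n) (h : SqM n m) (i j : Int) (a b : Nat) :
    entM (mset m i j) a b = (entM m a b || (a == toIx n i && b == toIx n j)) := by
  obtain ⟨h1, h2⟩ := h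
  have hi : toIx n i < n := toIx_lt hn i
  have hj : toIx n j < n := toIx_lt hn j
  have hrowlt : toIx n i < m.length := by omega
  have hrow : m.getD (toIx n i) [] = m[toIx n i] := by
    simp [List.getD, List.getElem?_eq_getElem hrowlt]
  have hrlen : (m[toIx n i]).length = n := h2 _ (List.getElem_mem hrowlt)
  have hmset : mset m i j = m.set (toIx n i) ((m.getD (toIx n i) []).set (toIx n j) true) := by
    simp only [mset, h1]; rfl
  rw [hmset]
  unfold entM
  by_cases ha : a = toIx n i
  · rw [ha, List.getElem?_set_self (by omega)]
    simp only [Option.getD_some]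
    by_cases hb : b = toIx n j
    · rw [hb, hrow, List.getElem?_set_self (by omega)]
      simp
    · rw [hrow, List.getElem?_set_ne (fun hc => hb hc.symm)]
      simp [List.getElem?_eq_getElem (show toIx n i < m.length by omega), hb]
  · rw [List.getElem?_set_ne (fun hc => ha hc.symm)]
    simp [ha]

def wfold (ws : List (Int × Int)) (m : List (List Bool)) : List (List Bool) :=
  ws.foldl (fun m w => mset m w.1 w.2) m

theorem SqM_wfold {n : Nat} (ws : List (Int × Int)) {m : List (List Bool)} (h : SqM n m) :
    SqM n (wfold ws m) := by
  induction ws generalizing m with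
  | nil => exact h
  | cons w t ih => exact ih (SqM_mset h w.1 w.2)

theorem entM_wfold {n : Nat} (hn : 0 < n) (ws : List (Int × Int)) {m : List (List Bool)}
    (h : SqM n m) (a b : Nat) :
    entM (wfold ws m) a b =
      (entM m a b || ws.any (fun w => a == toIx n w.1 && b == toIx n w.2)) := by
  induction ws generalizing m with
  | nil => simp [wfold]
  | cons w t ih =>
    show entM (wfold t (mset m w.1 w.2)) a b = _
    rw [ih (SqM_mset h w.1 w.2), entM_mset hn h]
    simp [Bool.or_assoc]

theorem matrix_eq {n : Nat} {m : List (List Bool)} (h : SqM n m) :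
    m = (List.range n).map (fun (a : Nat) => (List.range n).map (fun (b : Nat) => entM m a b)) := by
  obtain ⟨h1, h2⟩ := h
  apply List.ext_getElem
  · simp [h1]
  · intro a ha ha'
    simp only [List.getElem_map, List.getElem_range]
    apply List.ext_getElem
    · simp [h2 _ (List.getElem_mem ha)]
    · intro b hb hb'
      simp only [List.getElem_map, List.getElem_range]
      unfold entM
      rw [List.getElem?_eq_getElem (by omega : a < m.length)]
      simp only [Option.getD_some]
      rw [List.getElem?_eq_getElem hb]
      simp

theorem map2_eq (n : Nat) (f g : Nat → Nat → Bool)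
    (h : ∀ a b, a < n → b < n → f a b = g a b) :
    (List.range n).map (fun a => (List.range n).map (fun b => f a b))
      = (List.range n).map (fun a => (List.range n).map (fun b => g a b)) := by
  apply List.map_congr_left
  intro a ha
  apply List.map_congr_left
  intro b hb
  exact h a b (List.mem_range.mp ha) (List.mem_range.mp hb)

theorem wfold_nil_matrix (L : List (Int × Int)) : wfold L ([] : List (List Bool)) = [] := by
  induction L with
  | nil => rfl
  | cons w t ih =>
    show wfold t (mset [] w.1 w.2) = []
    simpa [mset] using ih

theorem wfold_ext_mem (n : Nat) (L1 L2 : List (Int × Int)) (h : ∀ w, w ∈ L1 ↔ w ∈ L2) :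
    wfold L1 (List.replicate n (List.replicate n false))
      = wfold L2 (List.replicate n (List.replicate n false)) := by
  rcases Nat.eq_zero_or_pos n with rfl | hn
  · show wfold L1 [] = wfold L2 []
    rw [wfold_nil_matrix, wfold_nil_matrix]
  · refine (matrix_eq (SqM_wfold L1 (SqM_zero n))).trans
      ((map2_eq n _ _ ?_).trans (matrix_eq (SqM_wfold L2 (SqM_zero n))).symm)
    intro a b _ _
    rw [entM_wfold hn L1 (SqM_zero n), entM_wfold hn L2 (SqM_zero n)]
    have : L1.any (fun w => a == toIx n w.1 && b == toIx n w.2)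
        = L2.any (fun w => a == toIx n w.1 && b == toIx n w.2) := by
      apply Bool.coe_iff_coe.mp
      rw [List.any_eq_true, List.any_eq_true]
      constructor
      · rintro ⟨w, hw, hp⟩; exact ⟨w, (h w).mp hw, hp⟩
      · rintro ⟨w, hw, hp⟩; exact ⟨w, (h w).mpr hw, hp⟩
    rw [this]

theorem foldl_to_wfold {β : Type} (l : List β) (C : β → Bool) (i j : β → Int)
    (m : List (List Bool)) :
    l.foldl (fun m v => if C v then m else mset m (i v) (j v)) m
      = wfold ((l.filter (fun v => !C v)).map (fun v => (i v, j v))) m := by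
  induction l generalizing m with
  | nil => rfl
  | cons a t ih =>
    rw [List.foldl_cons, List.filter_cons]
    by_cases h : C a
    · simp [h, ih]
    · simp only [h, Bool.not_false, if_pos, if_neg, Bool.false_eq_true, not_false_iff,
        List.map_cons]
      show t.foldl _ (mset m (i a) (j a)) = wfold ((i a, j a) :: _) m
      rw [ih]
      rfl

theorem foldl_wfold {β : Type} (l : List β) (W : β → List (Int × Int)) (m : List (List Bool)) :
    l.foldl (fun m u => wfold (W u) m) m = wfold (l.flatMap W) m := by
  induction l generalizing m with
  | nil => rfl
  | cons a t ih =>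
    rw [List.foldl_cons, List.flatMap_cons]
    unfold wfold
    rw [List.foldl_append]
    exact ih _

-- ------- descendant sets: DFS (A) vs grow-until-fixpoint (B) -------
theorem mem_foldl_union (K : Int → List Int) (l : List Int) (s : PySem.Set Int) (x : Int) :
    x ∈ l.foldl (fun s y => PySem.Set.union s (PySem.Set.ofList (K y))) s
      ↔ x ∈ s ∨ ∃ y ∈ l, x ∈ K y := by
  induction l generalizing s with
  | nil => simp
  | cons a t ih =>
    rw [List.foldl_cons, ih, PySem.Set.mem_union, PySem.Set.mem_ofList]
    constructor
    · rintro ((h | h) | ⟨y, hy, h⟩)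
      · exact Or.inl h
      · exact Or.inr ⟨a, List.mem_cons_self, h⟩
      · exact Or.inr ⟨y, List.mem_cons_of_mem a hy, h⟩
    · rintro (h | ⟨y, hy, h⟩)
      · exact Or.inl (Or.inl h)
      · rcases List.mem_cons.mp hy with rfl | hy
        · exact Or.inl (Or.inr h)
        · exact Or.inr ⟨y, hy, h⟩

theorem mem_altStep (kids : PySem.Dict Int (List Int)) (u : Int) (cur : PySem.Set Int) (x : Int) :
    x ∈ altStep kids u cur ↔ x ∈ cur ∨ x ∈ kids.getD u [] ∨ ∃ y ∈ cur, x ∈ kids.getD y [] := by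
  unfold altStep
  rw [mem_foldl_union, PySem.Set.mem_union, PySem.Set.mem_ofList]
  tauto

-- ======== DFS core ========
theorem dfs_fold (ch : PySem.Dict Int (List Int)) (T : Finset Int) (fuel : Nat)
    (IH : ∀ cur vis, (T.filter (fun t => t ∉ vis)).card < fuel →
      (∀ x ∈ vis, x ∈ dfsA ch fuel cur vis) ∧
      (∀ x ∈ dfsA ch fuel cur vis, x ∈ vis ∨ ∀ c ∈ ch.getD x [], c ∈ dfsA ch fuel cur vis) ∧
      (∀ c ∈ ch.getD cur [], c ∈ dfsA ch fuel cur vis)) :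
    ∀ (L : List Int) (vis acc : PySem.Set Int),
      (∀ c ∈ L, c ∈ T) →
      (T.filter (fun t => t ∉ acc)).card ≤ fuel →
      (∀ x ∈ acc, x ∈ vis ∨ ∀ c ∈ ch.getD x [], c ∈ acc) →
      (∀ x ∈ acc, x ∈ L.foldl (fun v c => if c ∈ v then v else dfsA ch fuel c (PySem.Set.add v c)) acc) ∧
      (∀ x ∈ L.foldl (fun v c => if c ∈ v then v else dfsA ch fuel c (PySem.Set.add v c)) acc,
        x ∈ vis ∨ ∀ c ∈ ch.getD x [], c ∈ L.foldl (fun v c => if c ∈ v then v else dfsA ch fuel c (PySem.Set.add v c)) acc) ∧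
      (∀ c ∈ L, c ∈ L.foldl (fun v c => if c ∈ v then v else dfsA ch fuel c (PySem.Set.add v c)) acc) ∧
      (T.filter (fun t => t ∉ L.foldl (fun v c => if c ∈ v then v else dfsA ch fuel c (PySem.Set.add v c)) acc)).card ≤ fuel := by
  intro L
  induction L with
  | nil =>
    intro vis acc _ hcard hinv
    refine ⟨fun x hx => hx, ?_, by simp, hcard⟩
    intro x hx
    rcases hinv x hx with h | h
    · exact Or.inl h
    · exact Or.inr h
  | cons a t ih =>
    intro vis acc hL hcard hinv
    rw [List.foldl_cons]
    by_cases hmem : a ∈ acc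
    · simp only [if_pos hmem]
      obtain ⟨c1, c2, c3, c4⟩ := ih vis acc (fun c hc => hL c (List.mem_cons_of_mem a hc)) hcard hinv
      exact ⟨c1, c2, fun c hc => by
        rcases List.mem_cons.mp hc with rfl | hc
        · exact c1 c hmem
        · exact c3 c hc, c4⟩
    · simp only [if_neg hmem]
      have haT : a ∈ T := hL a List.mem_cons_self
      have hssub : T.filter (fun t => t ∉ PySem.Set.add acc a) ⊂ T.filter (fun t => t ∉ acc) := by
        constructor
        · intro y hy
          rw [Finset.mem_filter] at hy ⊢
          refine ⟨hy.1, fun hyacc => hy.2 ?_⟩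
          rw [PySem.Set.mem_add]
          exact Or.inl hyacc
        · intro hsup
          have ha1 : a ∈ T.filter (fun t => t ∉ acc) := Finset.mem_filter.mpr ⟨haT, hmem⟩
          have ha2 := hsup ha1
          rw [Finset.mem_filter, PySem.Set.mem_add] at ha2
          exact ha2.2 (Or.inr rfl)
      have hcard' : (T.filter (fun t => t ∉ PySem.Set.add acc a)).card < fuel :=
        lt_of_lt_of_le (Finset.card_lt_card hssub) hcard
      obtain ⟨i1, i2, i3⟩ := IH a (PySem.Set.add acc a) hcard'
      set acc' := dfsA ch fuel a (PySem.Set.add acc a) with hacc'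
      have hsub1 : ∀ x ∈ acc, x ∈ acc' := fun x hx =>
        i1 x (by rw [PySem.Set.mem_add]; exact Or.inl hx)
      have hsuba : a ∈ acc' := i1 a (by rw [PySem.Set.mem_add]; exact Or.inr rfl)
      have hinv' : ∀ x ∈ acc', x ∈ vis ∨ ∀ c ∈ ch.getD x [], c ∈ acc' := by
        intro x hx
        rcases i2 x hx with hx' | hcl
        · rw [PySem.Set.mem_add] at hx'
          rcases hx' with hx' | rfl
          · rcases hinv x hx' with h | h
            · exact Or.inl h
            · exact Or.inr (fun c hc => hsub1 c (h c hc))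
          · exact Or.inr i3
        · exact Or.inr hcl
      have hcard'' : (T.filter (fun t => t ∉ acc')).card ≤ fuel := by
        refine le_of_lt (lt_of_le_of_lt (Finset.card_le_card ?_) hcard')
        intro y hy
        rw [Finset.mem_filter] at hy ⊢
        exact ⟨hy.1, fun hmemy => hy.2 (i1 y hmemy)⟩
      obtain ⟨c1, c2, c3, c4⟩ := ih vis acc' (fun c hc => hL c (List.mem_cons_of_mem a hc)) hcard'' hinv'
      refine ⟨fun x hx => c1 x (hsub1 x hx), c2, fun c hc => ?_, c4⟩
      rcases List.mem_cons.mp hc with rfl | hc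
      · exact c1 c hsuba
      · exact c3 c hc

theorem dfs_main (ch : PySem.Dict Int (List Int)) (T : Finset Int)
    (hC : ∀ x c, c ∈ ch.getD x [] → c ∈ T) :
    ∀ (fuel : Nat) (cur : Int) (vis : PySem.Set Int),
      (T.filter (fun t => t ∉ vis)).card < fuel →
      (∀ x ∈ vis, x ∈ dfsA ch fuel cur vis) ∧
      (∀ x ∈ dfsA ch fuel cur vis, x ∈ vis ∨ ∀ c ∈ ch.getD x [], c ∈ dfsA ch fuel cur vis) ∧
      (∀ c ∈ ch.getD cur [], c ∈ dfsA ch fuel cur vis) := by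
  intro fuel
  induction fuel with
  | zero => intro cur vis h; exact absurd h (Nat.not_lt_zero _)
  | succ f ihf =>
    intro cur vis h
    have hres := dfs_fold ch T f ihf (ch.getD cur []) vis vis
      (fun c hc => hC cur c hc) (Nat.lt_succ_iff.mp h) (fun x hx => Or.inl hx)
    show (∀ x ∈ vis, x ∈ dfsA ch (f+1) cur vis) ∧ _
    have hdef : dfsA ch (f+1) cur vis =
        (ch.getD cur []).foldl (fun v c => if c ∈ v then v else dfsA ch f c (PySem.Set.add v c)) vis := rfl
    rw [hdef]
    exact ⟨hres.1, hres.2.1, hres.2.2.1⟩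

theorem dfs_upper (ch : PySem.Dict Int (List Int)) (Y : Int → Prop)
    (hclosed : ∀ x, Y x → ∀ c ∈ ch.getD x [], Y c) :
    ∀ (fuel : Nat) (cur : Int) (vis : PySem.Set Int),
      (∀ x ∈ vis, Y x) → (∀ c ∈ ch.getD cur [], Y c) →
      ∀ x ∈ dfsA ch fuel cur vis, Y x := by
  intro fuel
  induction fuel with
  | zero => intro cur vis hvis _ x hx; exact hvis x hx
  | succ f ihf =>
    intro cur vis hvis hcur
    show ∀ x ∈ (ch.getD cur []).foldl (fun v c => if c ∈ v then v else dfsA ch f c (PySem.Set.add v c)) vis, Y x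
    have : ∀ (L : List Int) (acc : PySem.Set Int), (∀ c ∈ L, Y c) → (∀ x ∈ acc, Y x) →
        ∀ x ∈ L.foldl (fun v c => if c ∈ v then v else dfsA ch f c (PySem.Set.add v c)) acc, Y x := by
      intro L
      induction L with
      | nil => intro acc _ hacc x hx; exact hacc x hx
      | cons a t iht =>
        intro acc hL hacc
        rw [List.foldl_cons]
        by_cases hmem : a ∈ acc
        · simp only [if_pos hmem]
          exact iht acc (fun c hc => hL c (List.mem_cons_of_mem a hc)) hacc
        · simp only [if_neg hmem]
          have hYa : Y a := hL a List.mem_cons_self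
          have hacc' : ∀ x ∈ dfsA ch f a (PySem.Set.add acc a), Y x := by
            apply ihf a (PySem.Set.add acc a)
            · intro x hx
              rw [PySem.Set.mem_add] at hx
              rcases hx with hx | rfl
              · exact hacc x hx
              · exact hYa
            · exact hclosed a hYa
          exact iht _ (fun c hc => hL c (List.mem_cons_of_mem a hc)) hacc'
    exact this (ch.getD cur []) vis hcur hvis

-- ======== saturation ========
theorem sat_mono (kids : PySem.Dict Int (List Int)) (u : Int) (t : Nat) (x : Int)
    (hx : x ∈ (altStep kids u)^[t] PySem.Set.empty) : x ∈ (altStep kids u)^[t+1] PySem.Set.empty := by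
  rw [Function.iterate_succ_apply', mem_altStep]
  exact Or.inl hx

theorem sat_subset_T (kids : PySem.Dict Int (List Int)) (T : Finset Int)
    (hC : ∀ x c, c ∈ kids.getD x [] → c ∈ T) (u : Int) :
    ∀ (t : Nat), ∀ x ∈ (altStep kids u)^[t] PySem.Set.empty, x ∈ T := by
  intro t
  induction t with
  | zero => intro x hx; simp [PySem.Set.empty] at hx
  | succ s ih =>
    intro x hx
    rw [Function.iterate_succ_apply', mem_altStep] at hx
    rcases hx with hx | hx | ⟨y, _, hx⟩
    · exact ih x hx
    · exact hC u x hx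
    · exact hC y x hx

theorem sat_step_congr (kids : PySem.Dict Int (List Int)) (u : Int) (s s' : PySem.Set Int)
    (h : ∀ x, x ∈ s ↔ x ∈ s') (x : Int) : x ∈ altStep kids u s ↔ x ∈ altStep kids u s' := by
  rw [mem_altStep, mem_altStep]
  constructor
  · rintro (hx | hx | ⟨y, hy, hx⟩)
    · exact Or.inl ((h x).mp hx)
    · exact Or.inr (Or.inl hx)
    · exact Or.inr (Or.inr ⟨y, (h y).mp hy, hx⟩)
  · rintro (hx | hx | ⟨y, hy, hx⟩)
    · exact Or.inl ((h x).mpr hx)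
    · exact Or.inr (Or.inl hx)
    · exact Or.inr (Or.inr ⟨y, (h y).mpr hy, hx⟩)

theorem sat_propagate (kids : PySem.Dict Int (List Int)) (u : Int) (t : Nat)
    (h : ∀ x, x ∈ (altStep kids u)^[t+1] PySem.Set.empty ↔ x ∈ (altStep kids u)^[t] PySem.Set.empty) :
    ∀ (s : Nat) (x : Int), x ∈ (altStep kids u)^[t+s] PySem.Set.empty ↔ x ∈ (altStep kids u)^[t] PySem.Set.empty := by
  intro s
  induction s with
  | zero => intro x; rfl
  | succ r ih =>
    intro x
    have e : t + (r + 1) = (t + r) + 1 := by omega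
    rw [e, Function.iterate_succ_apply']
    have h2 : x ∈ altStep kids u ((altStep kids u)^[t] PySem.Set.empty) ↔
        x ∈ (altStep kids u)^[t+1] PySem.Set.empty := by
      rw [Function.iterate_succ_apply']
    rw [sat_step_congr kids u _ _ ih x, h2, h x]

-- the B loop, started on the k-th iterate, computes (membership-wise) the (k+f)-th iterate
theorem altLoop_mem (kids : PySem.Dict Int (List Int)) (u : Int) :
    ∀ (f k : Nat) (x : Int),
      x ∈ altLoop kids u f ((altStep kids u)^[k] PySem.Set.empty) ↔
        x ∈ (altStep kids u)^[k + f] PySem.Set.empty := by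
  intro f
  induction f with
  | zero => intro k x; rfl
  | succ f ih =>
    intro k x
    have hdef : altLoop kids u (f+1) ((altStep kids u)^[k] PySem.Set.empty)
        = (if PySem.Set.equal (altStep kids u ((altStep kids u)^[k] PySem.Set.empty))
              ((altStep kids u)^[k] PySem.Set.empty)
           then (altStep kids u)^[k] PySem.Set.empty
           else altLoop kids u f (altStep kids u ((altStep kids u)^[k] PySem.Set.empty))) := rfl
    rw [hdef]
    by_cases h : PySem.Set.equal (altStep kids u ((altStep kids u)^[k] PySem.Set.empty))
        ((altStep kids u)^[k] PySem.Set.empty) = true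
    · rw [if_pos h]
      have hstab : ∀ y, y ∈ (altStep kids u)^[k+1] PySem.Set.empty ↔
          y ∈ (altStep kids u)^[k] PySem.Set.empty := by
        intro y
        have := (PySem.Set.equal_iff _ _).mp h y
        rwa [Function.iterate_succ_apply']
      exact (sat_propagate kids u k hstab (f+1) x).symm
    · rw [if_neg h]
      have : altStep kids u ((altStep kids u)^[k] PySem.Set.empty)
          = (altStep kids u)^[k+1] PySem.Set.empty := (Function.iterate_succ_apply' _ _ _).symm
      rw [this, ih (k+1) x]
      have e : (k + 1) + f = k + (f + 1) := by omega
      rw [e]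

theorem reach_eq (edges : List (Int × Int)) (nodes : List Int) (u v : Int) :
    v ∈ dfsA (childrenOf edges nodes) (edges.length + 1) u PySem.Set.empty ↔
      v ∈ altDescend (childrenOf edges nodes) edges.length u := by
  set ch := childrenOf edges nodes with hch
  set T : Finset Int := (edges.map Prod.snd).toFinset with hT
  have hC : ∀ x c, c ∈ ch.getD x [] → c ∈ T := by
    intro x c hc
    rw [hch, childrenOf_getD] at hc
    rw [hT, List.mem_toFinset]
    rcases List.mem_map.mp hc with ⟨e, he, rfl⟩
    exact List.mem_map.mpr ⟨e, List.mem_of_mem_filter he, rfl⟩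
  have hTcard : T.card ≤ edges.length := by
    calc T.card ≤ (edges.map Prod.snd).length := List.toFinset_card_le _
    _ = edges.length := List.length_map _
  have hAD : ∀ x, x ∈ altDescend ch edges.length u ↔
      x ∈ (altStep ch u)^[edges.length + 1] PySem.Set.empty := by
    intro x
    have := altLoop_mem ch u (edges.length + 1) 0 x
    simpa [altDescend] using this
  rw [hAD v]
  have hcard : (T.filter (fun t => t ∉ (PySem.Set.empty : PySem.Set Int))).card < edges.length + 1 := by
    have : T.filter (fun t => t ∉ (PySem.Set.empty : PySem.Set Int)) = T := by
      apply Finset.filter_true_of_mem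
      intro t _
      simp [PySem.Set.empty]
    rw [this]
    omega
  have hm := dfs_main ch T hC (edges.length + 1) u PySem.Set.empty hcard
  -- a membership-stability fact used twice below
  have hstab1 : ∀ y, y ∈ (altStep ch u)^[edges.length + 2] PySem.Set.empty ↔
      y ∈ (altStep ch u)^[edges.length + 1] PySem.Set.empty := by
    -- stabilization: the chain of iterates grows inside T, |T| ≤ E, so some step ≤ E repeats
    have hstabpt : ∃ t ≤ edges.length, ∀ x, x ∈ (altStep ch u)^[t+1] PySem.Set.empty ↔
        x ∈ (altStep ch u)^[t] PySem.Set.empty := by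
      by_contra hcon
      push Not at hcon
      have key : ∀ t, t ≤ edges.length + 1 →
          t ≤ (T.filter (fun a => a ∈ (altStep ch u)^[t] PySem.Set.empty)).card := by
        intro t
        induction t with
        | zero => intro _; exact Nat.zero_le _
        | succ s ihs =>
          intro hs
          have hsE : s ≤ edges.length := by omega
          obtain ⟨x, hx⟩ := hcon s hsE
          have hxnew : x ∈ (altStep ch u)^[s+1] PySem.Set.empty ∧
              x ∉ (altStep ch u)^[s] PySem.Set.empty := by
            rcases hx with ⟨h1, h2⟩ | ⟨h1, h2⟩
            · exact ⟨h1, h2⟩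
            · exact absurd (sat_mono ch u s x h2) h1
          have hssub : T.filter (fun a => a ∈ (altStep ch u)^[s] PySem.Set.empty) ⊂
              T.filter (fun a => a ∈ (altStep ch u)^[s+1] PySem.Set.empty) := by
            constructor
            · intro y hy
              rw [Finset.mem_filter] at hy ⊢
              exact ⟨hy.1, sat_mono ch u s y hy.2⟩
            · intro hsup
              have : x ∈ T.filter (fun a => a ∈ (altStep ch u)^[s+1] PySem.Set.empty) :=
                Finset.mem_filter.mpr ⟨sat_subset_T ch T hC u (s+1) x hxnew.1, hxnew.1⟩
              have := hsup this
              rw [Finset.mem_filter] at this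
              exact hxnew.2 this.2
          have := Finset.card_lt_card hssub
          have := ihs (by omega)
          omega
      have h1 := key (edges.length + 1) (le_refl _)
      have h2 : (T.filter (fun a => a ∈ (altStep ch u)^[edges.length+1] PySem.Set.empty)).card ≤ T.card :=
        Finset.card_le_card (Finset.filter_subset _ _)
      omega
    obtain ⟨t, htE, hstabt⟩ := hstabpt
    intro y
    have p1 := sat_propagate ch u t hstabt (edges.length + 1 - t) y
    have p2 := sat_propagate ch u t hstabt (edges.length + 2 - t) y
    have e1 : t + (edges.length + 1 - t) = edges.length + 1 := by omega
    have e2 : t + (edges.length + 2 - t) = edges.length + 2 := by omega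
    rw [e1] at p1
    rw [e2] at p2
    rw [p1, p2]
  constructor
  · intro hv
    refine dfs_upper ch (fun x => x ∈ (altStep ch u)^[edges.length + 1] PySem.Set.empty) ?_
      (edges.length + 1) u PySem.Set.empty ?_ ?_ v hv
    · intro x hx c hc
      rw [← hstab1 c]
      have e : (edges.length + 2) = (edges.length + 1) + 1 := rfl
      rw [e, Function.iterate_succ_apply', mem_altStep]
      exact Or.inr (Or.inr ⟨x, hx, hc⟩)
    · intro x hx; simp [PySem.Set.empty] at hx
    · intro c hc
      rw [← hstab1 c]
      have e : (edges.length + 2) = (edges.length + 1) + 1 := rfl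
      rw [e, Function.iterate_succ_apply', mem_altStep]
      exact Or.inr (Or.inl hc)
  · intro hv
    suffices h : ∀ t, ∀ x, x ∈ (altStep ch u)^[t] PySem.Set.empty →
        x ∈ dfsA ch (edges.length + 1) u PySem.Set.empty by
      exact h _ v hv
    intro t
    induction t with
    | zero => intro x hx; simp [PySem.Set.empty] at hx
    | succ s ih =>
      intro x hx
      rw [Function.iterate_succ_apply', mem_altStep] at hx
      rcases hx with hx | hx | ⟨y, hy, hx⟩
      · exact ih x hx
      · exact hm.2.2 x hx
      · rcases hm.2.1 y (ih y hy) with hy' | hcl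
        · simp [PySem.Set.empty] at hy'
        · exact hcl x hx


theorem wfold_map {β : Type} (l : List β) (k1 k2 : β → Int) (z : List (List Bool)) :
    l.foldl (fun m e => mset m (k1 e) (k2 e)) z = wfold (l.map fun e => (k1 e, k2 e)) z := by
  unfold wfold
  rw [List.foldl_map]

-- B's inner loop skips u inside the pair; split the skip into the components
theorem skip_pair (dB : Int → List Int)
    (F G : (List (List Bool) × List (List Bool)) → Int → Int → List (List Bool)) :
    (fun (p : List (List Bool) × List (List Bool)) (u : Int) =>
        (dB u).foldl (fun p v => if v ≠ u then (F p u v, G p u v) else p) p)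
      = fun p u => (dB u).foldl
          (fun p v => (if v = u then p.1 else F p u v, if v = u then p.2 else G p u v)) p := by
  funext p u
  congr 1
  funext p v
  by_cases h : v = u
  · simp [h]
  · simp [h]

-- generic comparison of the two r3/r4 accumulation loops: A iterates the already
-- u-free visited list with one guard, B iterates the full descendant set skipping u
theorem p34_comp (n : Nat) (nodesl : List Int) (dA dB : Int → List Int)
    (hd : ∀ u v, v ∈ dA u ↔ v ∈ dB u ∧ v ≠ u)
    (G : Int → Int → Bool) (k1 k2 : Int → Int → Int) :
    nodesl.foldl (fun m u => (dA u).foldl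
        (fun m v => if G u v then m else mset m (k1 u v) (k2 u v)) m)
      (List.replicate n (List.replicate n false))
    = nodesl.foldl (fun m u => (dB u).foldl
        (fun m v => if v = u then m else if G u v then m else mset m (k1 u v) (k2 u v)) m)
      (List.replicate n (List.replicate n false)) := by
  have hA : (fun (m : List (List Bool)) (u : Int) => (dA u).foldl
        (fun m v => if G u v then m else mset m (k1 u v) (k2 u v)) m)
      = fun m u => wfold (((dA u).filter (fun v => !G u v)).map (fun v => (k1 u v, k2 u v))) m := by
    funext m u
    exact foldl_to_wfold (dA u) (G u) (k1 u) (k2 u) m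
  have hB0 : (fun (m : List (List Bool)) (u : Int) => (dB u).foldl
        (fun m v => if v = u then m else if G u v then m else mset m (k1 u v) (k2 u v)) m)
      = fun m u => (dB u).foldl
          (fun m v => if (decide (v = u) || G u v) then m else mset m (k1 u v) (k2 u v)) m := by
    funext m u
    congr 1
    funext m v
    by_cases h : v = u
    · simp [h]
    · by_cases h2 : G u v <;> simp [h, h2]
  have hB : (fun (m : List (List Bool)) (u : Int) => (dB u).foldl
        (fun m v => if v = u then m else if G u v then m else mset m (k1 u v) (k2 u v)) m)
      = fun m u => wfold (((dB u).filter (fun v => !(decide (v = u) || G u v))).map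
          (fun v => (k1 u v, k2 u v))) m := by
    rw [hB0]
    funext m u
    exact foldl_to_wfold (dB u) (fun v => decide (v = u) || G u v) (k1 u) (k2 u) m
  rw [hA, hB, foldl_wfold, foldl_wfold]
  apply wfold_ext_mem
  intro w
  simp only [List.mem_flatMap, List.mem_map, List.mem_filter]
  constructor
  · rintro ⟨u, hu, v, ⟨hv, hg⟩, rfl⟩
    obtain ⟨hvB, hne⟩ := (hd u v).mp hv
    refine ⟨u, hu, v, ⟨hvB, ?_⟩, rfl⟩
    simp only [Bool.not_eq_eq_eq_not, Bool.not_true] at hg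
    simp [hne, hg]
  · rintro ⟨u, hu, v, ⟨hvB, hg⟩, rfl⟩
    simp only [Bool.not_eq_eq_eq_not, Bool.not_true, Bool.or_eq_false_iff,
      decide_eq_false_iff_not] at hg
    refine ⟨u, hu, v, ⟨(hd u v).mpr ⟨hvB, hg.1⟩, by simp [hg.2]⟩, rfl⟩

theorem port_eq (edges : List (Int × Int)) (idx : List (Int × Int)) (nodes : List Int) (root : Int) :
    compute_matrices edges idx nodes root = compute_matrices_alt edges idx nodes root := by
  simp only [compute_matrices, compute_matrices_alt]
  rw [foldl_pair_split edges
    (fun m (e : Int × Int) => mset m ((PySem.Dict.mk idx).getD e.1 0) ((PySem.Dict.mk idx).getD e.2 0))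
    (fun m (e : Int × Int) => mset m ((PySem.Dict.mk idx).getD e.2 0) ((PySem.Dict.mk idx).getD e.1 0))]
  simp only [wfold_map edges
      (fun e => (PySem.Dict.mk idx).getD e.1 0) (fun e => (PySem.Dict.mk idx).getD e.2 0),
    wfold_map edges
      (fun e => (PySem.Dict.mk idx).getD e.2 0) (fun e => (PySem.Dict.mk idx).getD e.1 0)]
  -- B's r2 list is the swapped direct list; normalize it to A's form
  have hr2 : (List.map (fun (p : Int × Int) => (p.2, p.1))
        (List.map (fun (e : Int × Int) => ((PySem.Dict.mk idx).getD e.1 0, (PySem.Dict.mk idx).getD e.2 0)) edges))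
      = List.map (fun (e : Int × Int) => ((PySem.Dict.mk idx).getD e.2 0, (PySem.Dict.mk idx).getD e.1 0)) edges := by
    rw [List.map_map]
    rfl
  rw [hr2]
  rw [foldl_pair_split_nested nodes
      (fun u => (dfsA (childrenOf edges nodes) (edges.length + 1) u PySem.Set.empty).discard u)
      (fun m u v => if mget
          (wfold (List.map (fun e => ((PySem.Dict.mk idx).getD e.1 0, (PySem.Dict.mk idx).getD e.2 0)) edges)
            (List.replicate nodes.length (List.replicate nodes.length false)))
          ((PySem.Dict.mk idx).getD u 0) ((PySem.Dict.mk idx).getD v 0) = true then m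
        else mset m ((PySem.Dict.mk idx).getD u 0) ((PySem.Dict.mk idx).getD v 0))
      (fun m u v => if mget
          (wfold (List.map (fun e => ((PySem.Dict.mk idx).getD e.2 0, (PySem.Dict.mk idx).getD e.1 0)) edges)
            (List.replicate nodes.length (List.replicate nodes.length false)))
          ((PySem.Dict.mk idx).getD v 0) ((PySem.Dict.mk idx).getD u 0) = true then m
        else mset m ((PySem.Dict.mk idx).getD v 0) ((PySem.Dict.mk idx).getD u 0))
      (List.replicate nodes.length (List.replicate nodes.length false),
       List.replicate nodes.length (List.replicate nodes.length false))]
  rw [skip_pair (fun u => altDescend (childrenOf edges nodes) edges.length u)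
      (fun p u v => if mget
          (markM (blankM nodes.length)
            (List.map (fun e => ((PySem.Dict.mk idx).getD e.1 0, (PySem.Dict.mk idx).getD e.2 0)) edges))
          ((PySem.Dict.mk idx).getD u 0) ((PySem.Dict.mk idx).getD v 0) = true then p.1
        else mset p.1 ((PySem.Dict.mk idx).getD u 0) ((PySem.Dict.mk idx).getD v 0))
      (fun p u v => if mget
          (markM (blankM nodes.length)
            (List.map (fun e => ((PySem.Dict.mk idx).getD e.2 0, (PySem.Dict.mk idx).getD e.1 0)) edges))
          ((PySem.Dict.mk idx).getD v 0) ((PySem.Dict.mk idx).getD u 0) = true then p.2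
        else mset p.2 ((PySem.Dict.mk idx).getD v 0) ((PySem.Dict.mk idx).getD u 0))]
  rw [foldl_pair_split_nested nodes
      (fun u => altDescend (childrenOf edges nodes) edges.length u)
      (fun m u v => if v = u then m else if mget
          (markM (blankM nodes.length)
            (List.map (fun e => ((PySem.Dict.mk idx).getD e.1 0, (PySem.Dict.mk idx).getD e.2 0)) edges))
          ((PySem.Dict.mk idx).getD u 0) ((PySem.Dict.mk idx).getD v 0) = true then m
        else mset m ((PySem.Dict.mk idx).getD u 0) ((PySem.Dict.mk idx).getD v 0))
      (fun m u v => if v = u then m else if mget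
          (markM (blankM nodes.length)
            (List.map (fun e => ((PySem.Dict.mk idx).getD e.2 0, (PySem.Dict.mk idx).getD e.1 0)) edges))
          ((PySem.Dict.mk idx).getD v 0) ((PySem.Dict.mk idx).getD u 0) = true then m
        else mset m ((PySem.Dict.mk idx).getD v 0) ((PySem.Dict.mk idx).getD u 0))
      (blankM nodes.length, blankM nodes.length)]
  have hd : ∀ u v : Int,
      v ∈ (dfsA (childrenOf edges nodes) (edges.length + 1) u PySem.Set.empty).discard u ↔
        v ∈ altDescend (childrenOf edges nodes) edges.length u ∧ v ≠ u := by
    intro u v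
    rw [PySem.Set.mem_discard, reach_eq]
  refine congrArg₂ Prod.mk rfl (congrArg₂ Prod.mk rfl (congrArg₂ Prod.mk ?_ (congrArg₂ Prod.mk ?_ ?_)))
  · exact p34_comp nodes.length nodes
      (fun u => (dfsA (childrenOf edges nodes) (edges.length + 1) u PySem.Set.empty).discard u)
      (fun u => altDescend (childrenOf edges nodes) edges.length u) hd _ _ _
  · exact p34_comp nodes.length nodes
      (fun u => (dfsA (childrenOf edges nodes) (edges.length + 1) u PySem.Set.empty).discard u)
      (fun u => altDescend (childrenOf edges nodes) edges.length u) hd _ _ _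
  · -- r5: B folds over .values, A over .items with .2
    simp only [PySem.Dict.values, List.foldl_map]
    rfl

-- ===== VERDICT (by name: the statement is the Claim_ definition above) =====
theorem compute_matrices_spec : Claim_equal_compute_matrices := by
  intro edges idx nodes root _ _
  unfold Spec_compute_matrices
  exact port_eq edges idx nodes root
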